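-- pv_equiv track=rewrite | github.com/uavkz/SwarMown | mainapp/to_refactor_services.py | extra_drone_cycle
-- ===== SOURCE A (Python) =====
-- def extra_drone_cycle(estim_pathes, given_drone_num, truck_path, drones, field):  # нельзя редачить то что приходит
--     # в параметрах
--     pathways = estim_pathes[field]
--     for i in range(given_drone_num):
--         path = []
--         path.append(truck_path[field])  # starts from 0
--         if pathways > 0:
--             path.append([1])  # fly the path
--             path.append(truck_path[field + 1])
--             pathways -= 1
--         else:
--             path.append(truck_path[field])
--             path.append(truck_path[field + 1])
--         drones[i].append(path)
--
--     return drones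
-- ===== SOURCE B (Python) =====
-- def extra_drone_cycle(estim_pathes, given_drone_num, truck_path, drones, field):
--     pathways = estim_pathes[field]
--     if given_drone_num <= 0:
--         return drones
--     fly_count = max(0, min(given_drone_num, pathways))
--     start = truck_path[field]
--     end = truck_path[field + 1]
--     fly = [start, [1], end]
--     ground = [start, start, end]
--     return ([d + [fly] for d in drones[:fly_count]]
--             + [d + [ground] for d in drones[fly_count:given_drone_num]]
--             + drones[given_drone_num:])
-- ===== Notes on version B (the rewrite author's own statement) =====
-- stated objective: simpler
-- what changed: B replaces A's per-iteration mutating pathways counter and in-loop branch by a precomputed fly_count and a three-way slice-map-concatenate construction of the result (A mutates drones in place, B builds a new list; return values are equal).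
import Mathlib
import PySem

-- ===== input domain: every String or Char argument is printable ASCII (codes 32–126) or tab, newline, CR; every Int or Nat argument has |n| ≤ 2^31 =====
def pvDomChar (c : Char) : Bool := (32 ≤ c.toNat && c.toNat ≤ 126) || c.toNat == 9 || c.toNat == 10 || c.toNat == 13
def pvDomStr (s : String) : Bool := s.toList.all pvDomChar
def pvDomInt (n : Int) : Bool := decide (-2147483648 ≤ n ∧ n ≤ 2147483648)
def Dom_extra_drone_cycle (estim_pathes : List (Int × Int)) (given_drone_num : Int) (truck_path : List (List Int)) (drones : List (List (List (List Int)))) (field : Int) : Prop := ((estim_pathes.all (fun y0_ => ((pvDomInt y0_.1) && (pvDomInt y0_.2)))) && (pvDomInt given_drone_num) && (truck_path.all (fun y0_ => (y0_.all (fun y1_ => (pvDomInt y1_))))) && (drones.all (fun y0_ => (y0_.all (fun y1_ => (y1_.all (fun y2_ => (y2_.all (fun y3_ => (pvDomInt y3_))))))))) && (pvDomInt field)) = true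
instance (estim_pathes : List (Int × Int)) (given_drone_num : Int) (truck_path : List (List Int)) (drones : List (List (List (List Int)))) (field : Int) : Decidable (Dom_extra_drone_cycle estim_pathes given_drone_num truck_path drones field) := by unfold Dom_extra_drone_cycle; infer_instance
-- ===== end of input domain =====

-- B builds a new list from slices instead of mutating `drones` per iteration; A mutates `drones`
-- in place, so the equivalence proved here is about the RETURN value only.

-- ===== PORT A =====
-- transliteration of A: pathways counter threaded through the loop state; drones[i].append(path)
-- is pySetD at i of (pyGetD ... ++ [path]); indices i from range(given_drone_num) are nonnegative.
def extra_drone_cycle (estim_pathes : List (Int × Int)) (given_drone_num : Int) (truck_path : List (List Int)) (drones : List (List (List (List Int)))) (field : Int) : List (List (List (List Int))) :=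
  ((PySem.List.pyRange 0 given_drone_num 1).foldl
      (fun (st : Int × List (List (List (List Int)))) i =>
        if st.1 > 0 then
          (st.1 - 1, PySem.List.pySetD st.2 i (PySem.List.pyGetD st.2 i []
            ++ [[PySem.List.pyGetD truck_path field [], [(1 : Int)], PySem.List.pyGetD truck_path (field + 1) []]]))
        else
          (st.1, PySem.List.pySetD st.2 i (PySem.List.pyGetD st.2 i []
            ++ [[PySem.List.pyGetD truck_path field [], PySem.List.pyGetD truck_path field [], PySem.List.pyGetD truck_path (field + 1) []]])))
      (((PySem.Dict.mk estim_pathes).get? field).getD 0, drones)).2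

-- ===== PORT B =====
def extra_drone_cycle_alt (estim_pathes : List (Int × Int)) (given_drone_num : Int) (truck_path : List (List Int)) (drones : List (List (List (List Int)))) (field : Int) : List (List (List (List Int))) :=
  if given_drone_num ≤ 0 then drones
  else
    ((PySem.List.slice drones none (some (max 0 (min given_drone_num (((PySem.Dict.mk estim_pathes).get? field).getD 0))))).map
        (fun d => d ++ [[PySem.List.pyGetD truck_path field [], [(1 : Int)], PySem.List.pyGetD truck_path (field + 1) []]]))
      ++ ((PySem.List.slice drones (some (max 0 (min given_drone_num (((PySem.Dict.mk estim_pathes).get? field).getD 0)))) (some given_drone_num)).map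
        (fun d => d ++ [[PySem.List.pyGetD truck_path field [], PySem.List.pyGetD truck_path field [], PySem.List.pyGetD truck_path (field + 1) []]]))
      ++ PySem.List.slice drones (some given_drone_num) none

-- ===== PRECONDITION & SPEC =====
-- Pre_ excludes exactly the inputs where A raises: KeyError (field not a key of estim_pathes) and
-- IndexError (given_drone_num > len(drones), or truck_path[field]/[field+1] out of range when the loop runs).
def Pre_extra_drone_cycle (estim_pathes : List (Int × Int)) (given_drone_num : Int) (truck_path : List (List Int)) (drones : List (List (List (List Int)))) (field : Int) : Prop :=
  field ∈ estim_pathes.map Prod.fst ∧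
  (0 < given_drone_num →
    given_drone_num ≤ drones.length ∧
    PySem.Raise.InRange truck_path.length field ∧
    PySem.Raise.InRange truck_path.length (field + 1))
instance (estim_pathes : List (Int × Int)) (given_drone_num : Int) (truck_path : List (List Int)) (drones : List (List (List (List Int)))) (field : Int) : Decidable (Pre_extra_drone_cycle estim_pathes given_drone_num truck_path drones field) := by unfold Pre_extra_drone_cycle; infer_instance

def pvWitness_extra_drone_cycle : (List (Int × Int)) × Int × List (List Int) × List (List (List (List Int))) × Int :=
  ([(0, 1)], 1, [[0], [2]], [[]], 0)

def Spec_extra_drone_cycle (estim_pathes : List (Int × Int)) (given_drone_num : Int) (truck_path : List (List Int)) (drones : List (List (List (List Int)))) (field : Int) (out : List (List (List (List Int)))) : Prop := out = extra_drone_cycle_alt estim_pathes given_drone_num truck_path drones field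
instance (estim_pathes : List (Int × Int)) (given_drone_num : Int) (truck_path : List (List Int)) (drones : List (List (List (List Int)))) (field : Int) (out : List (List (List (List Int)))) : Decidable (Spec_extra_drone_cycle estim_pathes given_drone_num truck_path drones field out) := by unfold Spec_extra_drone_cycle; infer_instance

-- ===== CLAIM (what is proved, stated in full; the proofs are below) =====
def Claim_equal_extra_drone_cycle : Prop := ∀ (estim_pathes : List (Int × Int)) (given_drone_num : Int) (truck_path : List (List Int)) (drones : List (List (List (List Int)))) (field : Int), Dom_extra_drone_cycle estim_pathes given_drone_num truck_path drones field → Pre_extra_drone_cycle estim_pathes given_drone_num truck_path drones field → Spec_extra_drone_cycle estim_pathes given_drone_num truck_path drones field (extra_drone_cycle estim_pathes given_drone_num truck_path drones field)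

-- ===== LEMMAS AND PROOFS =====

theorem pv_getD_append_cons {α : Type} (P : List α) (x : α) (t : List α) (d : α) :
    (P ++ x :: t).getD P.length d = x := by
  induction P with
  | nil => rfl
  | cons a P ih => simpa using ih

theorem pv_set_append_cons {α : Type} (P : List α) (x y : α) (t : List α) :
    (P ++ x :: t).set P.length y = P ++ y :: t := by
  induction P with
  | nil => rfl
  | cons a P ih => simpa using ih

-- the characterisation of A's loop: after n iterations starting with counter p, the first
-- min n p.toNat drones got F, the next n - min n p.toNat got G, the rest are untouched.
theorem pv_loop_split {α : Type} (F G : α → α) (dflt : α) :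
    ∀ (n : ℕ) (p : Int) (ds : List α), n ≤ ds.length →
      (PySem.List.pyRange 0 (n : Int) 1).foldl
        (fun (st : Int × List α) i =>
          if st.1 > 0 then
            (st.1 - 1, PySem.List.pySetD st.2 i (F (PySem.List.pyGetD st.2 i dflt)))
          else
            (st.1, PySem.List.pySetD st.2 i (G (PySem.List.pyGetD st.2 i dflt)))) (p, ds)
      = (p - min (n : Int) (max p 0),
         (ds.take (min n p.toNat)).map F
           ++ ((ds.drop (min n p.toNat)).take (n - min n p.toNat)).map G
           ++ ds.drop n) := by
  intro n
  induction n with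
  | zero =>
    intro p ds _
    simp [PySem.List.pyRange_one_eq_nil]
  | succ n ih =>
    intro p ds hn
    have hn' : n ≤ ds.length := Nat.le_of_succ_le hn
    have hlt : n < ds.length := hn
    have hcast : ((n + 1 : ℕ) : Int) = (n : Int) + 1 := by push_cast; ring
    rw [hcast, PySem.List.pyRange_one_succ_right (by positivity), List.foldl_append, ih p ds hn']
    have hdrop : ds.drop n = ds[n] :: ds.drop (n + 1) := List.drop_eq_getElem_cons hlt
    set ft : ℕ := min n p.toNat with hft
    have hftle : ft ≤ n := Nat.min_le_left _ _
    have hP : (((ds.take ft).map F) ++ ((ds.drop ft).take (n - ft)).map G).length = n := by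
      simp [List.length_take, List.length_drop]; omega
    -- rewrite the state list as P ++ ds[n] :: tail
    have hshape :
        (ds.take ft).map F ++ ((ds.drop ft).take (n - ft)).map G ++ ds.drop n
          = (((ds.take ft).map F) ++ ((ds.drop ft).take (n - ft)).map G) ++ ds[n] :: ds.drop (n + 1) := by
      rw [hdrop, List.append_assoc]
    simp only [List.foldl_cons, List.foldl_nil]
    by_cases hc : p - min (n : Int) (max p 0) > 0
    · rw [if_pos hc]
      have h1 : min (n : Int) (max p 0) = (ft : Int) := by omega
      have h2 : n < p.toNat := by omega
      have hftn : ft = n := by omega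
      have hft1 : min (n + 1) p.toNat = n + 1 := by omega
      have h3 : min ((n : Int) + 1) (max p 0) = (n : Int) + 1 := by omega
      rw [hshape, PySem.List.pySetD_natCast]
      have hg : PySem.List.pyGetD ((((ds.take ft).map F) ++ ((ds.drop ft).take (n - ft)).map G) ++ ds[n] :: ds.drop (n + 1)) (n : Int) dflt = ds[n] := by
        rw [PySem.List.pyGetD_natCast]
        have := pv_getD_append_cons (((ds.take ft).map F) ++ ((ds.drop ft).take (n - ft)).map G) ds[n] (ds.drop (n+1)) dflt
        rwa [hP] at this
      rw [hg]
      have hs := pv_set_append_cons (((ds.take ft).map F) ++ ((ds.drop ft).take (n - ft)).map G) ds[n] (F ds[n]) (ds.drop (n+1))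
      rw [hP] at hs
      rw [hs]
      have htake : ds.take (n + 1) = ds.take n ++ [ds[n]] := by
        rw [List.take_add_one, List.getElem?_eq_getElem hlt]; rfl
      rw [Prod.mk.injEq]
      refine ⟨by omega, ?_⟩
      rw [hft1, hftn]
      have htakeF : (ds.map F).take (n + 1) = (ds.map F).take n ++ [F ds[n]] := by
        rw [List.take_add_one, List.getElem?_eq_getElem (by simpa using hlt)]
        simp
      simp [htakeF, List.map_take, List.append_assoc]
    · rw [if_neg hc]
      have h1 : min (n : Int) (max p 0) = (ft : Int) := by omega
      have h2 : p.toNat ≤ ft := by omega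
      have hft1 : min (n + 1) p.toNat = ft := by omega
      have h3 : min ((n : Int) + 1) (max p 0) = (ft : Int) := by omega
      rw [hshape, PySem.List.pySetD_natCast]
      have hg : PySem.List.pyGetD ((((ds.take ft).map F) ++ ((ds.drop ft).take (n - ft)).map G) ++ ds[n] :: ds.drop (n + 1)) (n : Int) dflt = ds[n] := by
        rw [PySem.List.pyGetD_natCast]
        have := pv_getD_append_cons (((ds.take ft).map F) ++ ((ds.drop ft).take (n - ft)).map G) ds[n] (ds.drop (n+1)) dflt
        rwa [hP] at this
      rw [hg]
      have hs := pv_set_append_cons (((ds.take ft).map F) ++ ((ds.drop ft).take (n - ft)).map G) ds[n] (G ds[n]) (ds.drop (n+1))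
      rw [hP] at hs
      rw [hs]
      rw [Prod.mk.injEq]
      refine ⟨by omega, ?_⟩
      rw [hft1]
      have hlen2 : n - ft < (ds.drop ft).length := by simp [List.length_drop]; omega
      have hdn : (ds.drop ft)[n - ft]'hlen2 = ds[n] := by
        rw [List.getElem_drop]
        congr 1
        omega
      have hmid : (ds.drop ft).take (n + 1 - ft) = (ds.drop ft).take (n - ft) ++ [ds[n]] := by
        have h4 : n + 1 - ft = (n - ft) + 1 := by omega
        rw [h4, List.take_add_one, List.getElem?_eq_getElem hlen2, hdn]
        rfl
      rw [hmid]
      simp [List.append_assoc]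

-- ===== VERDICT (by name: the statement is the Claim_ definition above) =====
theorem extra_drone_cycle_spec : Claim_equal_extra_drone_cycle := by
  intro estim_pathes g truck_path drones field _ hpre
  unfold Spec_extra_drone_cycle extra_drone_cycle extra_drone_cycle_alt
  by_cases hg : g ≤ 0
  · rw [if_pos hg, PySem.List.pyRange_one_eq_nil hg]
    rfl
  · rw [if_neg hg]
    have hgpos : 0 < g := lt_of_not_ge hg
    obtain ⟨-, h2⟩ := hpre
    obtain ⟨hlen, -, -⟩ := h2 hgpos
    set p : Int := ((PySem.Dict.mk estim_pathes).get? field).getD 0 with hp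
    set start := PySem.List.pyGetD truck_path field [] with hstart
    set stop := PySem.List.pyGetD truck_path (field + 1) [] with hstop
    have hg' : g = ((g.toNat : ℕ) : Int) := by omega
    have hlen' : g.toNat ≤ drones.length := by omega
    rw [hg']
    have key :
        ((PySem.List.pyRange 0 ((g.toNat : ℕ) : Int) 1).foldl
          (fun (st : Int × List (List (List (List Int)))) i =>
            if st.1 > 0 then
              (st.1 - 1, PySem.List.pySetD st.2 i (PySem.List.pyGetD st.2 i []
                ++ [[start, [(1 : Int)], stop]]))
            else
              (st.1, PySem.List.pySetD st.2 i (PySem.List.pyGetD st.2 i []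
                ++ [[start, start, stop]])))
          (p, drones))
        = (p - min ((g.toNat : ℕ) : Int) (max p 0),
           (drones.take (min g.toNat p.toNat)).map (fun d => d ++ [[start, [(1 : Int)], stop]])
             ++ ((drones.drop (min g.toNat p.toNat)).take (g.toNat - min g.toNat p.toNat)).map (fun d => d ++ [[start, start, stop]])
             ++ drones.drop g.toNat) :=
      pv_loop_split (fun d => d ++ [[start, [(1 : Int)], stop]]) (fun d => d ++ [[start, start, stop]]) []
        g.toNat p drones hlen'
    rw [key]
    have hfc : max 0 (min (((g.toNat : ℕ) : Int)) p) = ((min g.toNat p.toNat : ℕ) : Int) := by omega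
    rw [hfc, PySem.List.slice_to_natCast, PySem.List.slice_from_natCast, PySem.List.slice_natCast]
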